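-- pv_equiv track=rewrite | github.com/loganfu06/Annual-CS-2021---2022 | Python/thonyyyyy.py | extractHTMLTags
-- ===== SOURCE A (Python) =====
-- def extractHTMLTags(html):
--     newHtml = ""
--     bracket = None
--     for i in range(len(html)):
--         if html[i] == "<":
--             bracket = True
--         if html[i] == ">":
--             bracket = False
--         if bracket == True and html[i] != "<":
--             newHtml += html[i]
--         else:
--             continue
--     return newHtml
-- ===== SOURCE B (Python) =====
-- def extractHTMLTags(html):
--     parts = html.split("<")
--     return "".join(p.split(">")[0] for p in parts[1:])
-- ===== Notes on version B (the rewrite author's own statement) =====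
-- stated objective: simpler
-- what changed: Replaced the per-character index loop with a Boolean/None bracket flag by splitting on '<' and joining each later piece's content up to its first '>', so the inside/outside state disappears.
import Mathlib
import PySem

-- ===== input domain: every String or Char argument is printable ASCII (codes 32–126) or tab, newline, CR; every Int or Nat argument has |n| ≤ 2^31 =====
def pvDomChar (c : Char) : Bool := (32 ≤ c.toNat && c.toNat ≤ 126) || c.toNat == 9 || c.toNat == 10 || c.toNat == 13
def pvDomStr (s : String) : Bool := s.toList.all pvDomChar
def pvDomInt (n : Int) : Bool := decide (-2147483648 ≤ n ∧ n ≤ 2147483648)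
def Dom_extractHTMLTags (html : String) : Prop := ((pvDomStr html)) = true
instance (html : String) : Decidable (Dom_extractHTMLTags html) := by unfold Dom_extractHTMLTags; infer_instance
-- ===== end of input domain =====

-- B replaces A's per-character loop with a bracket flag by split('<') / first-'>' prefixes joined together (simpler decomposition, same cost).

-- ===== PORT A =====
-- state: (newHtml as List Char, bracket : Option Bool — none = Python's None)
def extractHTMLTagsStep (st : List Char × Option Bool) (c : Char) : List Char × Option Bool :=
  let bracket1 := if c = '<' then some true else st.2
  let bracket2 := if c = '>' then some false else bracket1
  if bracket2 = some true ∧ c ≠ '<' then (st.1 ++ [c], bracket2) else (st.1, bracket2)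

def extractHTMLTags (html : String) : String :=
  -- for i in range(len(html)): … html[i] …  (in-range indexing: pyGetD with dummy default)
  let st := (PySem.List.pyRange 0 (PySem.Str.len html) 1).foldl
      (fun st i => extractHTMLTagsStep st (PySem.List.pyGetD html.toList i ' '))
      ([], none)
  String.ofList st.1

-- ===== PORT B =====
def extractHTMLTags_alt (html : String) : String :=
  let parts := PySem.Chars.splitOn html.toList ['<']          -- html.split("<")
  String.ofList (PySem.Chars.join []                           -- "".join(...)
    ((parts.drop 1).map (fun p => (PySem.Chars.splitOn p ['>']).headD [])))  -- p.split(">")[0]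

-- ===== PRECONDITION & SPEC =====
def Spec_extractHTMLTags (html : String) (out : String) : Prop := out = extractHTMLTags_alt html
instance (html : String) (out : String) : Decidable (Spec_extractHTMLTags html out) := by unfold Spec_extractHTMLTags; infer_instance

-- ===== CLAIM (what is proved, stated in full; the proofs are below) =====
def Claim_equal_extractHTMLTags : Prop := ∀ (html : String), Dom_extractHTMLTags html → Spec_extractHTMLTags html (extractHTMLTags html)

-- ===== LEMMAS AND PROOFS =====

-- simple accumulator-free split on a single separator character: (head piece, later pieces)
def sSplit (sep : Char) : List Char → List Char × List (List Char)
  | [] => ([], [])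
  | c :: r =>
    let p := sSplit sep r
    if c = sep then ([], p.1 :: p.2) else (c :: p.1, p.2)

-- A's remaining output given the chars still to scan and whether bracket == True now
def fA : List Char → Bool → List Char
  | [], _ => []
  | c :: r, inside =>
    if c = '<' then fA r true
    else if c = '>' then fA r false
    else if inside then c :: fA r inside else fA r inside

theorem sSplit_go (sep : Char) :
    ∀ (fuel : Nat) (l cur : List Char) (acc : List (List Char)), l.length < fuel →
      PySem.Chars.splitOn.go [sep] fuel l cur acc =
        acc.reverse ++ ((cur.reverse ++ (sSplit sep l).1) :: (sSplit sep l).2) := by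
  intro fuel
  induction fuel with
  | zero => intro l cur acc h; omega
  | succ n ih =>
    intro l cur acc h
    cases l with
    | nil => simp [PySem.Chars.splitOn.go, sSplit]
    | cons c r =>
      by_cases hc : c = sep
      · subst hc
        have hpre : [c].isPrefixOf (c :: r) = true := by simp [List.isPrefixOf]
        simp only [PySem.Chars.splitOn.go, hpre, if_pos]
        rw [ih]
        · simp [sSplit]
        · simpa using Nat.lt_of_succ_lt_succ h
      · have hpre : [sep].isPrefixOf (c :: r) = false := by
          simp [List.isPrefixOf]
          exact fun hh => (hc hh.symm).elim
        simp only [PySem.Chars.splitOn.go, hpre, Bool.false_eq_true, if_false]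
        rw [ih]
        · simp [sSplit, hc]
        · simpa using Nat.lt_of_succ_lt_succ h

theorem splitOn_eq_sSplit (sep : Char) (l : List Char) :
    PySem.Chars.splitOn l [sep] = ((sSplit sep l).1) :: (sSplit sep l).2 := by
  unfold PySem.Chars.splitOn
  rw [sSplit_go sep (l.length + 1) l [] [] (by omega)]
  simp

theorem sSplit_fst_takeWhile (sep : Char) (l : List Char) :
    (sSplit sep l).1 = l.takeWhile (fun c => !(c == sep)) := by
  induction l with
  | nil => simp [sSplit]
  | cons c r ih =>
    by_cases hc : c = sep
    · subst hc; simp [sSplit, List.takeWhile]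
    · simp only [sSplit, if_neg hc]
      rw [List.takeWhile_cons]
      simp [hc, ih]

-- head of p.split(">") is p up to the first '>'
theorem inner_head (p : List Char) :
    (PySem.Chars.splitOn p ['>']).headD [] = p.takeWhile (fun c => !(c == '>')) := by
  rw [splitOn_eq_sSplit]
  simp [sSplit_fst_takeWhile]

-- A's fold accumulates fA
theorem foldA (cs : List Char) :
    ∀ (acc : List Char) (b : Option Bool),
      (cs.foldl extractHTMLTagsStep (acc, b)).1 = acc ++ fA cs (b == some true) := by
  induction cs with
  | nil => intro acc b; simp [fA]
  | cons c r ih =>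
    intro acc b
    by_cases h1 : c = '<'
    · subst h1
      simp [extractHTMLTagsStep, fA, ih]
    · by_cases h2 : c = '>'
      · subst h2
        simp [extractHTMLTagsStep, h1, fA, ih]
      · cases b with
        | none => simp [extractHTMLTagsStep, h1, h2, fA, ih]
        | some bb =>
          cases bb with
          | false => simp [extractHTMLTagsStep, h1, h2, fA, ih]
          | true => simp [List.foldl_cons, extractHTMLTagsStep, h1, h2, fA, ih]

-- the central identity: A's scan equals the join over the split pieces
theorem fA_sSplit (cs : List Char) :
    fA cs true = ((sSplit '<' cs).1.takeWhile (fun c => !(c == '>')) ++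
        (((sSplit '<' cs).2.map (fun p => p.takeWhile (fun c => !(c == '>')))).flatten)) ∧
    fA cs false = (((sSplit '<' cs).2.map (fun p => p.takeWhile (fun c => !(c == '>')))).flatten) := by
  induction cs with
  | nil => simp [fA, sSplit]
  | cons c r ih =>
    obtain ⟨ih1, ih2⟩ := ih
    by_cases h1 : c = '<'
    · subst h1
      constructor <;> simp [fA, sSplit, ih1]
    · by_cases h2 : c = '>'
      · subst h2
        constructor <;> simp [fA, sSplit, h1, ih2]
      · constructor <;> simp [fA, sSplit, h1, h2, ih1, ih2]

theorem join_nil_flatten (l : List (List Char)) : PySem.Chars.join [] l = l.flatten := by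
  induction l with
  | nil => simp [PySem.Chars.join, List.intercalate]
  | cons a t ih =>
    cases t with
    | nil => simp [PySem.Chars.join, List.intercalate]
    | cons b t2 =>
      simp only [PySem.Chars.join, List.intercalate] at ih ⊢
      rw [show List.intersperse ([] : List Char) (a :: b :: t2)
            = a :: [] :: List.intersperse [] (b :: t2) from rfl]
      simp only [List.flatten]
      rw [ih]
      simp

-- ===== VERDICT (by name: the statement is the Claim_ definition above) =====
theorem extractHTMLTags_spec : Claim_equal_extractHTMLTags := by
  intro html _
  show extractHTMLTags html = extractHTMLTags_alt html
  unfold extractHTMLTags extractHTMLTags_alt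
  rw [show (PySem.List.pyRange 0 (PySem.Str.len html) 1).foldl
        (fun st i => extractHTMLTagsStep st (PySem.List.pyGetD html.toList i ' '))
        ([], none)
      = html.toList.foldl extractHTMLTagsStep ([], none) by
    simpa using PySem.List.foldl_pyRange_zero_pyGetD html.toList ' ' extractHTMLTagsStep (([], none) : List Char × Option Bool)]
  show String.ofList (List.foldl extractHTMLTagsStep ([], none) html.toList).1
      = String.ofList (PySem.Chars.join []
          (((PySem.Chars.splitOn html.toList ['<']).drop 1).map
            (fun p => (PySem.Chars.splitOn p ['>']).headD [])))
  congr 1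
  rw [foldA html.toList [] none]
  rw [splitOn_eq_sSplit, join_nil_flatten]
  simp only [List.drop_one, List.tail_cons, List.nil_append]
  rw [show ((none : Option Bool) == some true) = false from rfl]
  rw [(fA_sSplit html.toList).2]
  exact congrArg List.flatten (List.map_congr_left (fun p _ => by rw [inner_head]))
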